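-- pv_equiv track=rewrite | github.com/PaperCube/imu-stabilization-code | stabilizer-prototype/stabilizer-prototype-py/delay_measure.py | trend_segmentify
-- ===== SOURCE A (Python) =====
-- def compare(a, b):
--     if a > b:
--         return 1
--     elif a < b:
--         return -1
--     assert a == b, f'bad comparison on type {type(a), type(b)}'
--     return 0
--
-- def trend_segmentify(arr):
--     result = []
--     n = len(arr)
--     last_direction = None
--     last_update = 0
--     for i in range(1, n):
--         cur_direction = compare(arr[i], arr[i - 1])
--         if last_direction != cur_direction:
--             if last_direction is not None:
--                 result.append((last_update, i - 1, last_direction))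
--             last_direction = cur_direction
--             last_update = i - 1
--     result.append((last_update, n - 1, last_direction))
--     return result
-- ===== SOURCE B (Python) =====
-- def _cmp(a, b):
--     return (a > b) - (a < b)
--
-- def trend_segmentify(arr):
--     n = len(arr)
--     d = [_cmp(a, b) for a, b in zip(arr[1:], arr)]
--     if not d:
--         return [(0, n - 1, None)]
--     segs = []
--     j = 0
--     m = len(d)
--     while j < m:
--         k = j
--         while k < m and d[k] == d[j]:
--             k += 1
--         # run of equal directions covers d-indices j..k-1, i.e. array indices j..k
--         segs.append((j, k, d[j]))
--         j = k
--     return segs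
-- ===== Notes on version B (the rewrite author's own statement) =====
-- stated objective: alternative
-- what changed: B replaces A's single index loop threading last_direction/last_update state with two passes: it first materializes the adjacent-comparison direction list via zip, then groups consecutive equal directions into run segments.
import Mathlib
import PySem

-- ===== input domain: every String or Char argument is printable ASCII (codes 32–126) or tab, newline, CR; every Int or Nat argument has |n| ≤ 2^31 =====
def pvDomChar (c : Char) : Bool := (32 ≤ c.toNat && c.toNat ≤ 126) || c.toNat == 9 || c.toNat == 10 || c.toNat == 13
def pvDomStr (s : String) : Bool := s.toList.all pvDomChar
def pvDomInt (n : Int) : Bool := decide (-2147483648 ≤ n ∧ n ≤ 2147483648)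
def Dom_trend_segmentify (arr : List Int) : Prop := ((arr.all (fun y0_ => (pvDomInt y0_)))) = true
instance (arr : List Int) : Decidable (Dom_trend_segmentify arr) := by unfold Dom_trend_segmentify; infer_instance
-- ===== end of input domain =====

-- B re-decomposes A's single stateful index loop into two passes (direction list, then run grouping);
-- objective: alternative decomposition, same O(n) cost.

-- ===== PORT A =====
-- compare(a, b): the assert always passes on ints, so the result is 1 / -1 / 0.
def pyCompare (a b : Int) : Int := if a > b then 1 else if a < b then -1 else 0

-- A's loop body; arr[i] and arr[i-1] are always in range in A's loop, so pyGetD with default 0 is exact here.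
def stepA (arr : List Int) (st : List (Int × Int × Option Int) × Option Int × Int) (i : Int) :
    List (Int × Int × Option Int) × Option Int × Int :=
  let cur := pyCompare (PySem.List.pyGetD arr i 0) (PySem.List.pyGetD arr (i - 1) 0)
  if st.2.1 ≠ some cur then
    (st.1 ++ (if st.2.1 ≠ none then [(st.2.2, i - 1, st.2.1)] else []), some cur, i - 1)
  else st

def trend_segmentify (arr : List Int) : List (Int × Int × Option Int) :=
  let n : Int := arr.length
  let st := (PySem.List.pyRange 1 n 1).foldl (stepA arr) ([], none, 0)
  st.1 ++ [(st.2.2, n - 1, st.2.1)]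

-- ===== PORT B =====
-- _cmp(a, b) = (a > b) - (a < b)
def cmpB (a b : Int) : Int := (if a > b then 1 else 0) - (if a < b then 1 else 0)

-- B's outer while-loop over runs; the inner while-loop advancing k over the run of directions
-- equal to d[j] is ported as takeWhile (the run) / dropWhile (the rest).
def runSegs : List Int → Int → List (Int × Int × Option Int)
  | [], _ => []
  | v :: rest, j =>
      let tw := (rest.takeWhile (· == v)).length
      (j, j + 1 + tw, some v) :: runSegs (rest.dropWhile (· == v)) (j + 1 + tw)
termination_by d _ => d.length
decreasing_by
  have := List.length_dropWhile_le (· == v) rest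
  simp only [List.length_cons]
  omega

def trend_segmentify_alt (arr : List Int) : List (Int × Int × Option Int) :=
  let n : Int := arr.length
  let d := List.zipWith cmpB (PySem.List.slice arr (some 1) none) arr
  if d.isEmpty then [(0, n - 1, none)] else runSegs d 0

-- ===== PRECONDITION & SPEC =====
def Spec_trend_segmentify (arr : List Int) (out : List (Int × Int × Option Int)) : Prop := out = trend_segmentify_alt arr
instance (arr : List Int) (out : List (Int × Int × Option Int)) : Decidable (Spec_trend_segmentify arr out) := by unfold Spec_trend_segmentify; infer_instance

-- ===== CLAIM (what is proved, stated in full; the proofs are below) =====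
def Claim_equal_trend_segmentify : Prop := ∀ (arr : List Int), Dom_trend_segmentify arr → Spec_trend_segmentify arr (trend_segmentify arr)

-- ===== LEMMAS AND PROOFS =====

-- A's loop body with the direction supplied instead of recomputed from arr.
def gstep (st : List (Int × Int × Option Int) × Option Int × Int) (p : Int × Int) :
    List (Int × Int × Option Int) × Option Int × Int :=
  if st.2.1 ≠ some p.2 then
    (st.1 ++ (if st.2.1 ≠ none then [(st.2.2, p.1 - 1, st.2.1)] else []), some p.2, p.1 - 1)
  else st

-- A's final append, as a function so the end index can be rewritten.
def finishA (st : List (Int × Int × Option Int) × Option Int × Int) (e : Int) :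
    List (Int × Int × Option Int) :=
  st.1 ++ [(st.2.2, e, st.2.1)]

def dirs (arr : List Int) : List Int := List.zipWith cmpB arr.tail arr

lemma dirs_def (arr : List Int) : List.zipWith cmpB arr.tail arr = dirs arr := rfl

lemma length_dirs (arr : List Int) : (dirs arr).length = arr.length - 1 := by
  simp [dirs]

lemma runSegs_nil (j : Int) : runSegs [] j = [] := by rw [runSegs]

lemma runSegs_cons (v : Int) (rest : List Int) (j : Int) :
    runSegs (v :: rest) j
      = (j, j + 1 + ((rest.takeWhile (· == v)).length : Int), some v)
        :: runSegs (rest.dropWhile (· == v)) (j + 1 + ((rest.takeWhile (· == v)).length : Int)) := by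
  rw [runSegs]

lemma pyCompare_eq_cmpB (a b : Int) : pyCompare a b = cmpB a b := by
  unfold pyCompare cmpB; split_ifs <;> omega

lemma enum_getElem? {α : Type} : ∀ (l : List α) (s : Int) (k : Nat),
    (PySem.List.enumerate l s)[k]? = l[k]?.map (fun x => (s + (k : Int), x)) := by
  intro l
  induction l with
  | nil => intro s k; simp [PySem.List.enumerate_nil]
  | cons x xs ih =>
      intro s k
      rw [PySem.List.enumerate_cons]
      cases k with
      | zero => simp
      | succ k =>
          simp only [List.getElem?_cons_succ]
          rw [ih (s + 1) k]
          have e : s + 1 + (k : Int) = s + ((k + 1 : Nat) : Int) := by push_cast; ring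
          simp only [e]

lemma map_pyRange_eq_enum_dirs (arr : List Int) :
    (PySem.List.pyRange 1 (arr.length : Int) 1).map
      (fun i => (i, pyCompare (PySem.List.pyGetD arr i 0) (PySem.List.pyGetD arr (i - 1) 0)))
      = PySem.List.enumerate (dirs arr) 1 := by
  apply List.ext_getElem?
  intro k
  rw [List.getElem?_map, PySem.List.getElem?_pyRange_one, enum_getElem?]
  by_cases hk : k < arr.length - 1
  · have hin : k < ((arr.length : Int) - 1).toNat := by omega
    have hdk : k < (dirs arr).length := by rw [length_dirs]; exact hk
    rw [if_pos hin, List.getElem?_eq_getElem hdk]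
    simp only [Option.map_some]
    have hklen : k + 1 < arr.length := by
      have := length_dirs arr
      omega
    have ec1 : (1 : Int) + (k : Int) = ((k + 1 : Nat) : Int) := by push_cast; ring
    have ec2 : ((k + 1 : Nat) : Int) - 1 = ((k : Nat) : Int) := by push_cast; ring
    simp only [Option.some.injEq, Prod.mk.injEq, true_and]
    rw [ec1, ec2, PySem.List.pyGetD_natCast, PySem.List.pyGetD_natCast,
      List.getD_eq_getElem _ _ hklen, List.getD_eq_getElem _ _ (by omega)]
    simp only [dirs]
    rw [List.getElem_zipWith, pyCompare_eq_cmpB]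
    congr 1
    rw [List.getElem_tail]
  · have hout : ¬ k < ((arr.length : Int) - 1).toNat := by omega
    have hdk : (dirs arr).length ≤ k := by rw [length_dirs]; omega
    rw [if_neg hout, List.getElem?_eq_none hdk]
    simp

-- the central invariant: folding A's loop over the remaining enumerated directions, starting from
-- a pending run (value v, segment start lu), produces exactly B's run segments.
lemma main_invariant : ∀ (rest : List Int) (i : Int) (acc : List (Int × Int × Option Int)) (v lu : Int),
    finishA ((PySem.List.enumerate rest i).foldl gstep (acc, some v, lu)) (i + (rest.length : Int) - 1)
      = acc ++ (lu, i - 1 + ((rest.takeWhile (· == v)).length : Int), some v)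
          :: runSegs (rest.dropWhile (· == v)) (i - 1 + ((rest.takeWhile (· == v)).length : Int)) := by
  intro rest
  induction rest with
  | nil =>
      intro i acc v lu
      simp [PySem.List.enumerate_nil, runSegs_nil, finishA]
  | cons c rs ih =>
      intro i acc v lu
      rw [PySem.List.enumerate_cons]
      rw [show i + ((c :: rs).length : Int) - 1 = (i + 1) + (rs.length : Int) - 1 by
        push_cast [List.length_cons]; ring]
      by_cases hvc : c = v
      · subst hvc
        have hstep : gstep (acc, some c, lu) (i, c) = (acc, some c, lu) := by simp [gstep]
        simp only [List.foldl_cons, hstep]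
        rw [ih (i + 1) acc c lu]
        simp only [List.takeWhile_cons, List.dropWhile_cons, beq_self_eq_true, if_true,
          List.length_cons]
        rw [show i + 1 - 1 + ((rs.takeWhile (· == c)).length : Int)
              = i - 1 + (((rs.takeWhile (· == c)).length + 1 : Nat) : Int) by push_cast; ring]
      · have hne : (some v : Option Int) ≠ some c := by simpa using (fun h => hvc h.symm)
        have hstep : gstep (acc, some v, lu) (i, c)
            = (acc ++ [(lu, i - 1, some v)], some c, i - 1) := by simp [gstep, hne]
        simp only [List.foldl_cons, hstep]
        rw [ih (i + 1) (acc ++ [(lu, i - 1, some v)]) c (i - 1)]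
        have htw : (c :: rs).takeWhile (· == v) = [] := by simp [hvc]
        have hdw : (c :: rs).dropWhile (· == v) = c :: rs := by simp [hvc]
        rw [htw, hdw, runSegs_cons]
        simp only [List.length_nil, Nat.cast_zero, add_zero, List.append_assoc, List.cons_append,
          List.nil_append]
        rw [show i - 1 + 1 + ((rs.takeWhile (· == c)).length : Int)
              = i + 1 - 1 + ((rs.takeWhile (· == c)).length : Int) by ring]

lemma fold_bridge (arr : List Int) :
    (PySem.List.pyRange 1 (arr.length : Int) 1).foldl (stepA arr) ([], none, 0)
      = (PySem.List.enumerate (dirs arr) 1).foldl gstep ([], none, 0) := by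
  rw [← map_pyRange_eq_enum_dirs, List.foldl_map]
  rfl

-- ===== VERDICT (by name: the statement is the Claim_ definition above) =====
theorem trend_segmentify_spec : Claim_equal_trend_segmentify := by
  intro arr _
  unfold Spec_trend_segmentify
  show finishA ((PySem.List.pyRange 1 (arr.length : Int) 1).foldl (stepA arr) ([], none, 0))
        ((arr.length : Int) - 1) = trend_segmentify_alt arr
  rw [fold_bridge]
  simp only [trend_segmentify_alt, PySem.List.slice_from_one, dirs_def]
  cases hd : dirs arr with
  | nil =>
      simp [PySem.List.enumerate_nil, finishA]
  | cons c rs =>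
      have hlen : (arr.length : Int) - 1 = 2 + (rs.length : Int) - 1 := by
        have h1 := length_dirs arr
        rw [hd] at h1
        simp only [List.length_cons] at h1
        omega
      have hstep : gstep (([] : List (Int × Int × Option Int)), (none : Option Int), (0 : Int)) (1, c)
          = ([], some c, 0) := by simp [gstep]
      rw [PySem.List.enumerate_cons]
      simp only [List.foldl_cons, hstep, hlen, show (1 : Int) + 1 = 2 from by norm_num]
      rw [main_invariant rs 2 ([]) c 0]
      rw [if_neg (by simp : ¬(c :: rs).isEmpty = true), runSegs_cons]
      norm_num
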